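-- pv_equiv track=rewrite | github.com/matheins/codeask | src/conversation_manager.py | _validate_history
-- ===== SOURCE A (Python) =====
-- def _validate_history(messages: list[dict]) -> bool:
--     """Check that messages strictly alternate user/assistant starting with user."""
--     if not messages:
--         return True
--     if messages[0].get("role") != "user":
--         return False
--     for i in range(1, len(messages)):
--         expected = "assistant" if i % 2 == 1 else "user"
--         if messages[i].get("role") != expected:
--             return False
--     return True
-- ===== SOURCE B (Python) =====
-- def _validate_history(messages: list[dict]) -> bool:
--     """Check that messages strictly alternate user/assistant starting with user."""
--     pattern = ["user", "assistant"] * ((len(messages) + 1) // 2)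
--     return [m.get("role") for m in messages] == pattern[:len(messages)]
-- ===== Notes on version B (the rewrite author's own statement) =====
-- stated objective: alternative
-- what changed: Instead of scanning with per-index expected-role checks and early returns, B materialises the entire expected alternating role pattern by list replication and compares it for equality with the extracted role list.
import Mathlib
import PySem

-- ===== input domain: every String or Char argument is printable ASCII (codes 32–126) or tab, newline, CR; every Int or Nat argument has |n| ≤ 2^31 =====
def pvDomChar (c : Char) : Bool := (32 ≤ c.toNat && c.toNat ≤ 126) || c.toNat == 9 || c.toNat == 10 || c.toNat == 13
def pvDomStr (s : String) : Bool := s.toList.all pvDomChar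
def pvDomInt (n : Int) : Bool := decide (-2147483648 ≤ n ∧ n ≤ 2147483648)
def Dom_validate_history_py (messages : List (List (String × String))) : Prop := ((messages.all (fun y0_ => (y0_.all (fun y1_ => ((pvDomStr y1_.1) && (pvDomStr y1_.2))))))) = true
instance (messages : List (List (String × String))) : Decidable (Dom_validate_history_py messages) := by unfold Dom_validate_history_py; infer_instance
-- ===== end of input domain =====

-- B builds the whole expected alternating role pattern (list replication + truncation)
-- and compares it for equality with the extracted role list; same O(n) cost.

-- ===== PORT A =====
-- m.get("role"): first-match lookup in the association list (Python dict .get)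
def pvGetRole (m : List (String × String)) : Option String := m.lookup "role"

-- the 'for i in range(1, len(messages))' loop of A: recursion over the suffix,
-- carrying the index i whose parity decides the expected role
def pvALoop (rest : List (List (String × String))) (i : Nat) : Bool :=
  match rest with
  | [] => true
  | m :: tl =>
    let expected := if i % 2 == 1 then "assistant" else "user"
    if pvGetRole m ≠ some expected then false else pvALoop tl (i + 1)

def validate_history_py (messages : List (List (String × String))) : Bool :=
  match messages with
  | [] => true
  | m0 :: rest =>
    if pvGetRole m0 ≠ some "user" then false
    else pvALoop rest 1

-- ===== PORT B =====
-- pattern = ["user","assistant"] * ((len+1)//2); return roles == pattern[:len]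
-- (Python compares list[Optional[str]] with list[str]; a None role never equals a
-- string, which is why the pattern side is mapped through 'some')
def validate_history_py_alt (messages : List (List (String × String))) : Bool :=
  let pattern := (List.replicate ((messages.length + 1) / 2) ["user", "assistant"]).flatten
  messages.map pvGetRole == (pattern.take messages.length).map some

-- ===== PRECONDITION & SPEC =====
def Spec_validate_history_py (messages : List (List (String × String))) (out : Bool) : Prop := out = validate_history_py_alt messages
instance (messages : List (List (String × String))) (out : Bool) : Decidable (Spec_validate_history_py messages out) := by unfold Spec_validate_history_py; infer_instance

-- ===== CLAIM (what is proved, stated in full; the proofs are below) =====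
def Claim_equal_validate_history_py : Prop := ∀ (messages : List (List (String × String))), Dom_validate_history_py messages → Spec_validate_history_py messages (validate_history_py messages)

-- ===== LEMMAS AND PROOFS =====
-- the expected role at index i (proof-only helper): sequence of roles from index i on
def pvSeq (i n : Nat) : List String :=
  match n with
  | 0 => []
  | n + 1 => (if i % 2 == 1 then "assistant" else "user") :: pvSeq (i + 1) n

theorem pvSeq_add_two (n : Nat) : ∀ i, pvSeq (i + 2) n = pvSeq i n := by
  induction n with
  | zero => intro i; rfl
  | succ n ih =>
    intro i
    simp [pvSeq, Nat.add_mod_right, ih (i + 1), show i + 2 + 1 = i + 1 + 2 by omega]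

theorem pvALoop_iff (rest : List (List (String × String))) : ∀ i,
    pvALoop rest i = true ↔ rest.map pvGetRole = (pvSeq i rest.length).map some := by
  induction rest with
  | nil => intro i; simp [pvALoop, pvSeq]
  | cons m tl ih =>
    intro i
    by_cases h : pvGetRole m = some (if i % 2 = 1 then "assistant" else "user")
    · simp [pvALoop, pvSeq, h, ih (i + 1)]
    · simp [pvALoop, pvSeq, h]

theorem pvPattern_eq : ∀ n : Nat,
    ((List.replicate ((n + 1) / 2) ["user", "assistant"]).flatten).take n = pvSeq 0 n := by
  intro n
  induction n using Nat.strong_induction_on with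
  | _ n ih =>
    match n with
    | 0 => rfl
    | 1 => rfl
    | n + 2 =>
      have h : (n + 2 + 1) / 2 = (n + 1) / 2 + 1 := by omega
      rw [h, List.replicate_succ, List.flatten_cons]
      simp only [List.cons_append, List.nil_append, List.take_succ_cons]
      rw [ih n (by omega)]
      simp [pvSeq, pvSeq_add_two n 0]

-- ===== VERDICT (by name: the statement is the Claim_ definition above) =====
theorem validate_history_py_spec : Claim_equal_validate_history_py := by
  intro messages _
  unfold Spec_validate_history_py validate_history_py validate_history_py_alt
  show _ = (messages.map pvGetRole == ((((List.replicate ((messages.length + 1) / 2) ["user", "assistant"]).flatten).take messages.length).map some))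
  rw [pvPattern_eq messages.length]
  rw [Bool.eq_iff_iff, beq_iff_eq]
  cases messages with
  | nil => simp [pvSeq]
  | cons m0 rest =>
    by_cases h : pvGetRole m0 = some "user"
    · simp [h, pvSeq, pvALoop_iff rest 1]
    · simp [h, pvSeq]
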